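-- pv_equiv track=rewrite | github.com/MAYALURI-ANUSHA/Practice_Codes | A18.py | max_sum_for_array
-- ===== SOURCE A (Python) =====
-- def max_sum_for_array(n, k, x):
--     p=[]
--     for i in range(x):
--         if i!=k:
--             p.append(i)
--     m=max(p)
--     s=sum(p)+(m*(n-x+1))
--     return s
-- ===== SOURCE B (Python) =====
-- def max_sum_for_array(n, k, x):
--     s = x * (x - 1) // 2
--     if 0 <= k < x:
--         s -= k
--     m = x - 2 if k == x - 1 else x - 1
--     return s + m * (n - x + 1)
-- ===== Notes on version B (the rewrite author's own statement) =====
-- stated objective: faster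
-- what changed: Replaced the O(x) loop that builds, sums and maxes the list of 0..x-1 minus k by O(1) closed-form arithmetic (Gauss sum minus k if present, max = x-1 or x-2).
import Mathlib
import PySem

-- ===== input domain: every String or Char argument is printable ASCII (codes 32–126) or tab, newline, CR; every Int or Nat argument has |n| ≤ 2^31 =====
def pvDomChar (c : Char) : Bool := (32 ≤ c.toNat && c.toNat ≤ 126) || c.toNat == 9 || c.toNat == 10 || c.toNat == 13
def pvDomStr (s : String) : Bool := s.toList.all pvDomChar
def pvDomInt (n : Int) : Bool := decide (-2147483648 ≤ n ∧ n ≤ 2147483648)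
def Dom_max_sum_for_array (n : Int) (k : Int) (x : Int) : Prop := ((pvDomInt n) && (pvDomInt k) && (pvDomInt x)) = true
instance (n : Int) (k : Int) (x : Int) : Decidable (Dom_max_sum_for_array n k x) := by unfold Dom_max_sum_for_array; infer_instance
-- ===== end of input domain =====

-- B replaces A's O(x) list-building loop by O(1) closed-form arithmetic; equal return values on Pre_.

-- ===== PORT A =====
def max_sum_for_array (n : Int) (k : Int) (x : Int) : Int :=
  -- p.append(i) is ported as Array.push (Python's O(1) list append)
  let p := (PySem.List.pyRange 0 x 1).foldl (fun acc i => if i ≠ k then acc.push i else acc) (#[] : Array Int)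
  match PySem.List.max? p.toList (fun y => y) with
  | some m => p.toList.foldl (· + ·) 0 + m * (n - x + 1)
  | none => 0   -- Python raises ValueError (max of empty list) here; excluded by Pre_

-- ===== PORT B =====
def max_sum_for_array_alt (n : Int) (k : Int) (x : Int) : Int :=
  let s0 := PySem.Int.floordiv (x * (x - 1)) 2
  let s := if 0 ≤ k ∧ k < x then s0 - k else s0
  let m := if k = x - 1 then x - 2 else x - 1
  s + m * (n - x + 1)

-- ===== PRECONDITION & SPEC =====
-- Pre_ excludes exactly the inputs where A raises ValueError (max of empty sequence): x ≤ 0, or x = 1 and k = 0, where the list 0..x-1 without k is empty.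
def Pre_max_sum_for_array (n : Int) (k : Int) (x : Int) : Prop := 1 ≤ x ∧ ¬(x = 1 ∧ k = 0)
instance (n : Int) (k : Int) (x : Int) : Decidable (Pre_max_sum_for_array n k x) := by unfold Pre_max_sum_for_array; infer_instance
def pvWitness_max_sum_for_array : Int × Int × Int := (5, 1, 4)

def Spec_max_sum_for_array (n : Int) (k : Int) (x : Int) (out : Int) : Prop := out = max_sum_for_array_alt n k x
instance (n : Int) (k : Int) (x : Int) (out : Int) : Decidable (Spec_max_sum_for_array n k x out) := by unfold Spec_max_sum_for_array; infer_instance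

-- ===== CLAIM (what is proved, stated in full; the proofs are below) =====
def Claim_equal_max_sum_for_array : Prop := ∀ (n : Int) (k : Int) (x : Int), Dom_max_sum_for_array n k x → Pre_max_sum_for_array n k x → Spec_max_sum_for_array n k x (max_sum_for_array n k x)

-- ===== LEMMAS AND PROOFS =====

-- the loop builds the filtered range
lemma push_toList (k : Int) (l : List Int) (acc : Array Int) :
    (l.foldl (fun acc i => if i ≠ k then acc.push i else acc) acc).toList =
      l.foldl (fun acc i => if i ≠ k then acc ++ [i] else acc) acc.toList := by
  induction l generalizing acc with
  | nil => rfl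
  | cons h t ih =>
    simp only [List.foldl_cons]
    by_cases hk : h ≠ k
    · rw [if_pos hk, if_pos hk, ih, Array.toList_push]
    · rw [if_neg hk, if_neg hk, ih]

lemma pA_eq (k x : Int) :
    ((PySem.List.pyRange 0 x 1).foldl (fun acc i => if i ≠ k then acc.push i else acc) (#[] : Array Int)).toList =
      (PySem.List.pyRange 0 x 1).filter (fun i => decide (i ≠ k)) := by
  rw [push_toList]
  simpa using PySem.List.foldl_append_ite (p := fun i => i ≠ k) (f := fun i => i)
    (l := PySem.List.pyRange 0 x 1) (acc := [])

lemma mem_p (k x i : Int) :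
    i ∈ (PySem.List.pyRange 0 x 1).filter (fun i => decide (i ≠ k)) ↔ (0 ≤ i ∧ i < x) ∧ i ≠ k := by
  simp [List.mem_filter, PySem.List.mem_pyRange_one]

-- doubled sum of the filtered range (avoids division)
lemma sum_pr (k : Int) (m : Nat) :
    2 * (((PySem.List.pyRange 0 (m : Int) 1).filter (fun i => decide (i ≠ k))).sum) =
      (m : Int) * ((m : Int) - 1) - 2 * (if 0 ≤ k ∧ k < (m : Int) then k else 0) := by
  induction m with
  | zero =>
    rw [PySem.List.pyRange_one_eq_nil (by omega)]
    simp
  | succ m ih =>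
    push_cast
    rw [PySem.List.pyRange_one_succ_right (by omega : (0:Int) ≤ (m : Int))]
    rw [List.filter_append, List.sum_append]
    have hexp : ((m : Int) + 1) * ((m : Int) + 1 - 1) = (m : Int) * ((m : Int) - 1) + 2 * (m : Int) := by
      ring
    rw [hexp]
    by_cases hk : (m : Int) = k
    · rw [List.filter_cons_of_neg (by simp [hk])]
      subst hk
      have h1 : ¬(0 ≤ (m : Int) ∧ (m : Int) < (m : Int)) := by omega
      have h2 : (0 ≤ (m : Int) ∧ (m : Int) < (m : Int) + 1) := by omega
      rw [if_neg h1] at ih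
      rw [if_pos h2]
      simp only [List.filter_nil, List.sum_nil]
      linarith
    · rw [List.filter_cons_of_pos (by simpa using hk)]
      simp only [List.filter_nil, List.sum_cons, List.sum_nil]
      have hiff : (0 ≤ k ∧ k < (m : Int) + 1) ↔ (0 ≤ k ∧ k < (m : Int)) := by
        constructor <;> rintro ⟨ha, hb⟩ <;> exact ⟨ha, by omega⟩
      simp only [hiff]
      by_cases hc : 0 ≤ k ∧ k < (m : Int) <;>
        [rw [if_pos hc] at ih ⊢; rw [if_neg hc] at ih ⊢] <;> linarith

lemma filter_nonempty (k x : Int) (hx : 1 ≤ x) (hk : ¬(x = 1 ∧ k = 0)) :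
    (PySem.List.pyRange 0 x 1).filter (fun i => decide (i ≠ k)) ≠ [] := by
  intro h
  by_cases hk1 : k = x - 1
  · have hx2 : 2 ≤ x := by
      rcases lt_or_ge x 2 with h2 | h2
      · exact absurd ⟨by omega, by omega⟩ hk
      · exact h2
    have hm : (x - 2) ∈ (PySem.List.pyRange 0 x 1).filter (fun i => decide (i ≠ k)) :=
      (mem_p k x (x - 2)).mpr ⟨⟨by omega, by omega⟩, by omega⟩
    rw [h] at hm
    exact (List.not_mem_nil) hm
  · have hm : (x - 1) ∈ (PySem.List.pyRange 0 x 1).filter (fun i => decide (i ≠ k)) :=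
      (mem_p k x (x - 1)).mpr ⟨⟨by omega, by omega⟩, by omega⟩
    rw [h] at hm
    exact (List.not_mem_nil) hm

lemma max_p (k x : Int) (hx : 1 ≤ x) (hk : ¬(x = 1 ∧ k = 0)) :
    PySem.List.max? ((PySem.List.pyRange 0 x 1).filter (fun i => decide (i ≠ k))) (fun y => y) =
      some (if k = x - 1 then x - 2 else x - 1) := by
  set p := (PySem.List.pyRange 0 x 1).filter (fun i => decide (i ≠ k)) with hp
  set E : Int := if k = x - 1 then x - 2 else x - 1 with hE
  have hne := filter_nonempty k x hx hk
  obtain ⟨m, hm⟩ : ∃ m, PySem.List.max? p (fun y => y) = some m := by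
    cases hmax : PySem.List.max? p (fun y => y) with
    | none => exact absurd ((PySem.List.max?_eq_none_iff _ _).mp hmax) hne
    | some m => exact ⟨m, rfl⟩
  have hmemP := (mem_p k x m).mp (PySem.List.max?_mem hm)
  have hmax := PySem.List.max?_isMax hm
  have hEmem : E ∈ p := by
    rw [hp]
    apply (mem_p k x E).mpr
    by_cases h : k = x - 1
    · have hx2 : 2 ≤ x := by
        rcases lt_or_ge x 2 with h2 | h2
        · exact absurd ⟨by omega, by omega⟩ hk
        · exact h2
      simp only [hE, if_pos h]; omega
    · simp only [hE, if_neg h]; omega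
  have h1 : E ≤ m := hmax E hEmem
  have h2 : m ≤ E := by
    by_cases h : k = x - 1
    · simp only [hE, if_pos h]; subst h; omega
    · simp only [hE, if_neg h]; omega
  rw [hm, le_antisymm h2 h1]

lemma fd2 (s t : Int) : PySem.Int.floordiv (2 * s + 2 * t) 2 = s + t := by
  rw [← mul_add, PySem.Int.floordiv_eq_ediv_of_pos (by norm_num)]
  exact Int.mul_ediv_cancel_left _ (by norm_num)

lemma sum_p_int (k x : Int) (hx : 0 ≤ x) :
    ((PySem.List.pyRange 0 x 1).filter (fun i => decide (i ≠ k))).foldl (· + ·) 0 =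
      PySem.Int.floordiv (x * (x - 1)) 2 - (if 0 ≤ k ∧ k < x then k else 0) := by
  rw [← List.sum_eq_foldl]
  have h := sum_pr k x.toNat
  rw [Int.toNat_of_nonneg hx] at h
  set S := ((PySem.List.pyRange 0 x 1).filter (fun i => decide (i ≠ k))).sum with hS
  set T := (if 0 ≤ k ∧ k < x then k else 0) with hT
  have hxx : x * (x - 1) = 2 * S + 2 * T := by omega
  rw [hxx, fd2]
  omega

-- ===== VERDICT (by name: the statement is the Claim_ definition above) =====
theorem max_sum_for_array_spec : Claim_equal_max_sum_for_array := by
  intro n k x _ hpre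
  obtain ⟨hx, hk⟩ := hpre
  show max_sum_for_array n k x = max_sum_for_array_alt n k x
  simp only [max_sum_for_array, max_sum_for_array_alt, pA_eq]
  rw [max_p k x hx hk, sum_p_int k x (by omega)]
  split_ifs <;> ring
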